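-- pv_equiv track=rewrite | github.com/jodnddus/ps | programmers/타겟넘버.py | dfs
-- ===== SOURCE A (Python) =====
-- def dfs(sum, nums, index, sums_array):
--     if (len(nums) == index):
--         sums_array.append(sum)
--         return
--     else:
--         dfs(sum + nums[index], nums, index + 1, sums_array)
--         dfs(sum - nums[index], nums, index + 1, sums_array)
--
--     return sums_array
-- ===== SOURCE B (Python) =====
-- # Iterative level-by-level expansion instead of recursion; mutates sums_array in place like A (equivalence is about the return value).
-- def dfs(sum, nums, index, sums_array):
--     if len(nums) == index:
--         sums_array.append(sum)
--         return
--     results = [sum]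
--     for i in range(index, len(nums)):
--         x = nums[i]
--         results = [t for s in results for t in (s + x, s - x)]
--     sums_array.extend(results)
--     return sums_array
-- ===== Notes on version B (the rewrite author's own statement) =====
-- stated objective: alternative
-- what changed: Replaces the binary recursion with an iterative level-by-level expansion: a single results list is rebuilt once per remaining element (each partial sum s becomes s+x then s-x), which reproduces the DFS leaf order without recursion.
-- outside the precondition, e.g. on dfs(3, [1], 1, []): A returns None, B returns None; on dfs(3, [1, 2], 5, []): A raises IndexError, B returns [3]
import Mathlib
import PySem

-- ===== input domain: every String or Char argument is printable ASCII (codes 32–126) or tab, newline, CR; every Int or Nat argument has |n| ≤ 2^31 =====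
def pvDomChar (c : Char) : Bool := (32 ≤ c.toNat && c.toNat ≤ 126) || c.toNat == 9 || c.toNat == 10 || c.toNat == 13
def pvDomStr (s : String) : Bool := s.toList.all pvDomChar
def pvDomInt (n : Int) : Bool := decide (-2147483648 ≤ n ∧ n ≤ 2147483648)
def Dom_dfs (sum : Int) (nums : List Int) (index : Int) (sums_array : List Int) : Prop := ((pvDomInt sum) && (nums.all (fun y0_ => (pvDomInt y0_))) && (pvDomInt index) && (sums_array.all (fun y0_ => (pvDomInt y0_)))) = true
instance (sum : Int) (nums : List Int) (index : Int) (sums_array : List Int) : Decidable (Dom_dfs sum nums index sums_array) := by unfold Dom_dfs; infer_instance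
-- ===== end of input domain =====

-- B replaces A's binary recursion by an iterative level-by-level expansion of a results list;
-- both mutate sums_array in place in Python — the equivalence proved here is about the return value.

-- ===== PORT A =====
-- Literal port of A's recursion. Python's top-level base case (index == len) returns None, which has
-- no List Int value; Pre_dfs excludes it, and the port represents that case by the mutated array.
-- nums[index] is PySem.List.pyGet? (negative indices wrap; none = IndexError, excluded by Pre_dfs,
-- represented by returning the array unchanged).
def dfs (sum : Int) (nums : List Int) (index : Int) (sums_array : List Int) : List Int :=
  if (nums.length : Int) = index then
    sums_array ++ [sum]
  else
    match h : PySem.List.pyGet? nums index with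
    | none => sums_array            -- IndexError in Python; unreachable under Pre_dfs
    | some x =>
        dfs (sum - x) nums (index + 1) (dfs (sum + x) nums (index + 1) sums_array)
termination_by (nums.length - index).toNat
decreasing_by
  all_goals
    have hi : PySem.Raise.InRange nums.length index := by
      by_contra hc
      rw [← PySem.List.pyGet?_eq_none_iff nums index] at hc
      simp_all
    unfold PySem.Raise.InRange at hi
    omega

-- ===== PORT B =====
-- Literal port of Source B: if len == index append (None case, excluded by Pre_dfs, represented by the
-- mutated array); else fold over range(index, len), rebuilding results by the comprehension
-- [t for s in results for t in (s + x, s - x)], then extend sums_array with results.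
def dfs_alt (sum : Int) (nums : List Int) (index : Int) (sums_array : List Int) : List Int :=
  if (nums.length : Int) = index then
    sums_array ++ [sum]
  else
    let results :=
      (PySem.List.pyRange index (nums.length : Int) 1).foldl
        (fun res i =>
          let x := PySem.List.pyGetD nums i 0   -- nums[i]; in range for every i under Pre_dfs
          res.flatMap (fun s => [s + x, s - x]))
        [sum]
    sums_array ++ results

-- ===== PRECONDITION & SPEC =====
-- Pre_dfs excludes index == len(nums), where Python A returns None (not a list), and
-- |index| > len(nums) (index ≥ len or index < -len), where Python A raises IndexError at nums[index].
def Pre_dfs (sum : Int) (nums : List Int) (index : Int) (sums_array : List Int) : Prop :=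
  PySem.Raise.InRange nums.length index
instance (sum : Int) (nums : List Int) (index : Int) (sums_array : List Int) : Decidable (Pre_dfs sum nums index sums_array) := by unfold Pre_dfs; infer_instance

def pvWitness_dfs : Int × List Int × Int × List Int := (0, [1, 2, 3], 0, [])

def Spec_dfs (sum : Int) (nums : List Int) (index : Int) (sums_array : List Int) (out : List Int) : Prop := out = dfs_alt sum nums index sums_array
instance (sum : Int) (nums : List Int) (index : Int) (sums_array : List Int) (out : List Int) : Decidable (Spec_dfs sum nums index sums_array out) := by unfold Spec_dfs; infer_instance

-- ===== CLAIM (what is proved, stated in full; the proofs are below) =====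
def Claim_equal_dfs : Prop := ∀ (sum : Int) (nums : List Int) (index : Int) (sums_array : List Int), Dom_dfs sum nums index sums_array → Pre_dfs sum nums index sums_array → Spec_dfs sum nums index sums_array (dfs sum nums index sums_array)

-- ===== LEMMAS AND PROOFS =====

-- The DFS leaf order: expand s xs lists all signed sums of xs added to s, plus-branch first.
def pvExpand (s : Int) : List Int → List Int
  | [] => [s]
  | x :: xs => pvExpand (s + x) xs ++ pvExpand (s - x) xs

def pvStep (res : List Int) (x : Int) : List Int := res.flatMap (fun s => [s + x, s - x])

theorem pvStep_append (a b : List Int) (x : Int) :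
    pvStep (a ++ b) x = pvStep a x ++ pvStep b x := by
  simp [pvStep]

theorem foldl_pvStep_append (xs : List Int) (a b : List Int) :
    xs.foldl pvStep (a ++ b) = xs.foldl pvStep a ++ xs.foldl pvStep b := by
  induction xs generalizing a b with
  | nil => simp
  | cons x xs ih => simp [List.foldl_cons, pvStep_append, ih]

-- level-by-level expansion produces the DFS leaf order
theorem foldl_pvStep_eq_expand (xs : List Int) (s : Int) :
    xs.foldl pvStep [s] = pvExpand s xs := by
  induction xs generalizing s with
  | nil => simp [pvExpand]
  | cons x xs ih =>
      have h : pvStep [s] x = [s + x] ++ [s - x] := by simp [pvStep]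
      simp only [List.foldl_cons, h, foldl_pvStep_append, ih, pvExpand]

-- the values A reads from position i onwards
def pvVals (nums : List Int) (i : Int) : List Int :=
  (PySem.List.pyRange i (nums.length : Int) 1).map (fun j => PySem.List.pyGetD nums j 0)

theorem pvVals_nil (nums : List Int) (i : Int) (h : (nums.length : Int) ≤ i) :
    pvVals nums i = [] := by
  simp [pvVals, PySem.List.pyRange_one_eq_nil h]

theorem pvVals_cons (nums : List Int) (i : Int) (h : i < (nums.length : Int)) :
    pvVals nums i = PySem.List.pyGetD nums i 0 :: pvVals nums (i + 1) := by
  simp [pvVals, PySem.List.pyRange_one_cons h]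

-- A's recursion appends exactly the expansion of the values read from index on
theorem dfs_eq_append_expand (nums : List Int) (k : Nat) :
    ∀ (index : Int) (sum : Int) (acc : List Int),
      (-(nums.length : Int) ≤ index) → (index ≤ (nums.length : Int)) → ((nums.length : Int) - index).toNat = k →
      dfs sum nums index acc = acc ++ pvExpand sum (pvVals nums index) := by
  induction k with
  | zero =>
      intro index sum acc hlo hhi hk
      have hge : (nums.length : Int) ≤ index := by omega
      rw [dfs]
      have hidx : (nums.length : Int) = index := by omega
      simp [hidx, pvVals_nil nums index hge, pvExpand]
  | succ k ih =>
      intro index sum acc hlo hhi hk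
      have hlt : index < (nums.length : Int) := by omega
      rw [dfs]
      have hne : ¬ ((nums.length : Int) = index) := by omega
      simp only [hne, if_false]
      split
      · next hnone =>
          rw [PySem.List.pyGet?_eq_none_iff nums index] at hnone
          exact absurd (by unfold PySem.Raise.InRange; omega) hnone
      · next x hx =>
          have hxd : PySem.List.pyGetD nums index 0 = x := by
            simp [PySem.List.pyGetD, hx]
          rw [ih (index + 1) (sum + x) acc (by omega) (by omega) (by omega),
              ih (index + 1) (sum - x) _ (by omega) (by omega) (by omega),
              pvVals_cons nums index hlt, hxd, pvExpand, List.append_assoc]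

-- B's fold over the range is the fold over the read values
theorem dfs_alt_results (nums : List Int) (index : Int) (sum : Int) :
    (PySem.List.pyRange index (nums.length : Int) 1).foldl
        (fun res i =>
          let x := PySem.List.pyGetD nums i 0
          res.flatMap (fun s => [s + x, s - x]))
        [sum]
      = (pvVals nums index).foldl pvStep [sum] := by
  rw [pvVals, List.foldl_map]
  rfl

-- ===== VERDICT (by name: the statement is the Claim_ definition above) =====
theorem dfs_spec : Claim_equal_dfs := by
  intro sum nums index sums_array _hdom hpre
  unfold Spec_dfs dfs_alt
  have hlt : index < (nums.length : Int) := hpre.2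
  have hlo : -(nums.length : Int) ≤ index := hpre.1
  have hne : ¬ ((nums.length : Int) = index) := by omega
  simp only [hne, if_false]
  rw [dfs_eq_append_expand nums ((nums.length : Int) - index).toNat index sum sums_array hlo (by omega) rfl,
      dfs_alt_results, foldl_pvStep_eq_expand]
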